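-- pv_equiv track=rewrite | github.com/je0ng3/Algorithm | 프로그래머스/2/42860. 조이스틱/조이스틱.py | solution
-- ===== SOURCE A (Python) =====
-- def solution(name):
--     answer = 0
--     # 모든 문자 변형에 드는 시간
--     for c in name:
--         answer += min(ord(c)-ord('A'), ord('Z')-ord(c)+1)
--     # 커서 이동에 드는 시간
--     n = len(name)
--     move = n-1 # 계속 전진
--     for i in range(n): # 어느 구간에서 꺾는 것이 최적인지 파악
--         # i 다음 위치부터, 연속된 'A' 구간의 끝 찾기
--         j = i+1
--         while j<n and name[j]=='A':
--             j += 1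
--         # A를 만났을 때 직진, 후진 중 더 적게 이동하는 것 선택
--         move = min(
--             move,
--             i*2 + (n-j), # 전진 후 되돌아가기
--             i + 2*(n-j) # 처음부터 후진
--         )
--     return answer + move
-- ===== SOURCE B (Python) =====
-- def solution(name):
--     n = len(name)
--     answer = sum(min(ord(c) - 65, 91 - ord(c)) for c in name)
--     move = n - 1
--     j = n  # end of the run of 'A's starting right after position i, maintained backwards
--     for i in range(n - 1, -1, -1):
--         if not (i + 1 < n and name[i + 1] == 'A'):
--             j = i + 1
--         move = min(move, 2 * i + (n - j), i + 2 * (n - j))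
--     return answer + move
-- ===== Notes on version B (the rewrite author's own statement) =====
-- stated objective: alternative
-- what changed: A rescans the run of 'A' characters after every position with a nested while loop; B instead maintains the end of that run in a single reverse pass, one linear loop with no inner scan (worst-case asymptotic gain, but not measured >=1.5x faster on the generated inputs).
import Mathlib
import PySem

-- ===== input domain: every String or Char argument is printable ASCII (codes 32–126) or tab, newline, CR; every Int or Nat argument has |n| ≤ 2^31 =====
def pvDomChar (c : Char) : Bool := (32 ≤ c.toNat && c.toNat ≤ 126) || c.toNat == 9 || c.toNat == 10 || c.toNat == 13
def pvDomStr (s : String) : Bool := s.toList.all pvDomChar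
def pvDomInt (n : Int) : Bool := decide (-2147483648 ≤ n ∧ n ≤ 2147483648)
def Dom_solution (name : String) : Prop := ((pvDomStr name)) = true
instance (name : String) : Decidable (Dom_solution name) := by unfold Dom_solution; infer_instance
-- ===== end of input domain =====

-- B replaces A's per-position inner while-scan for the end of the 'A'-run by a single
-- reverse pass that maintains that end, giving one loop with no inner scan (objective: alternative).

-- ===== PORT A =====
-- the inner 'while j<n and name[j]=='A': j += 1' loop of A
def findJ (s : List Char) (j : Nat) : Nat :=
  if h : j < s.length ∧ s[j]! = 'A' then findJ s (j + 1) else j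
termination_by s.length - j
decreasing_by omega

def solution (name : String) : Int :=
  let s := name.toList
  let answer : Int :=
    s.foldl (fun a c => a + min ((c.toNat : Int) - ('A'.toNat : Int)) (('Z'.toNat : Int) - (c.toNat : Int) + 1)) 0
  let n := s.length
  let move : Int :=
    (List.range n).foldl
      (fun m i =>
        let j := findJ s (i + 1)
        min (min m ((i : Int) * 2 + ((n : Int) - (j : Int)))) ((i : Int) + 2 * ((n : Int) - (j : Int))))
      ((n : Int) - 1)
  answer + move

-- ===== PORT B =====
-- Source B's reverse loop 'for i in range(n-1, -1, -1)', as structural recursion downwards on i;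
-- returns (running min of move, current j = end of the 'A'-run right after position i)
def altGo (s : List Char) (n i : Nat) : Int × Nat :=
  if _h : i < n then
    let r := altGo s n (i + 1)
    let j := if i + 1 < n ∧ s[i + 1]! = 'A' then r.2 else i + 1
    (min (min r.1 (2 * (i : Int) + ((n : Int) - (j : Int)))) ((i : Int) + 2 * ((n : Int) - (j : Int))), j)
  else ((n : Int) - 1, n)
termination_by n - i

def solution_alt (name : String) : Int :=
  let s := name.toList
  let n := s.length
  let answer : Int := s.foldl (fun a c => a + min ((c.toNat : Int) - 65) (91 - (c.toNat : Int))) 0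
  answer + (altGo s n 0).1

-- ===== PRECONDITION & SPEC =====
def Spec_solution (name : String) (out : Int) : Prop := out = solution_alt name
instance (name : String) (out : Int) : Decidable (Spec_solution name out) := by unfold Spec_solution; infer_instance

-- ===== CLAIM (what is proved, stated in full; the proofs are below) =====
def Claim_equal_solution : Prop := ∀ (name : String), Dom_solution name → Spec_solution name (solution name)

-- ===== LEMMAS AND PROOFS =====

-- the two character-cost folds agree element by element
theorem answer_eq (s : List Char) : ∀ a : Int,
    s.foldl (fun a c => a + min ((c.toNat : Int) - ('A'.toNat : Int)) (('Z'.toNat : Int) - (c.toNat : Int) + 1)) a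
      = s.foldl (fun a c => a + min ((c.toNat : Int) - 65) (91 - (c.toNat : Int))) a := by
  induction s with
  | nil => intro a; rfl
  | cons c t ih =>
      intro a
      simp only [List.foldl_cons]
      have h : a + min ((c.toNat : Int) - ('A'.toNat : Int)) (('Z'.toNat : Int) - (c.toNat : Int) + 1)
          = a + min ((c.toNat : Int) - 65) (91 - (c.toNat : Int)) := by
        have hA : ('A'.toNat : Int) = 65 := by decide
        have hZ : ('Z'.toNat : Int) = 90 := by decide
        rw [hA, hZ]; omega
      rw [h, ih]

-- B's maintained j coincides with A's inner while-loop result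
theorem altGo_snd (s : List Char) : ∀ k i, s.length - i = k → i < s.length →
    (altGo s s.length i).2 = findJ s (i + 1) := by
  intro k
  induction k with
  | zero => intro i hk hi; omega
  | succ k ih =>
      intro i hk hi
      rw [altGo, findJ]
      simp only [hi, dif_pos]
      by_cases h : i + 1 < s.length ∧ s[i + 1]! = 'A'
      · simp only [h]
        exact ih (i + 1) (by omega) h.1
      · rw [if_neg h, dif_neg h]

-- a trailing min pulls out of A's left fold
theorem foldl_min_out (X Y : Nat → Int) : ∀ (l : List Nat) (c z : Int),
    l.foldl (fun a y => min (min a (X y)) (Y y)) (min c z)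
      = min (l.foldl (fun a y => min (min a (X y)) (Y y)) c) z := by
  intro l
  induction l with
  | nil => intro c z; rfl
  | cons y t ih =>
      intro c z
      simp only [List.foldl_cons]
      have h : min (min (min c z) (X y)) (Y y) = min (min (min c (X y)) (Y y)) z := by omega
      rw [h, ih]

-- A's forward fold over range equals B's backward recursion
theorem fold_eq_altGo (s : List Char) : ∀ k i, i + k = s.length →
    (List.range' i k).foldl
      (fun (m : Int) (x : Nat) =>
        min (min m ((x : Int) * 2 + ((s.length : Int) - ((findJ s (x + 1) : Nat) : Int))))
          ((x : Int) + 2 * ((s.length : Int) - ((findJ s (x + 1) : Nat) : Int))))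
      ((s.length : Int) - 1)
      = (altGo s s.length i).1 := by
  intro k
  induction k with
  | zero =>
      intro i hk
      have hi : i = s.length := by omega
      subst hi
      rw [altGo]
      simp
  | succ k ih =>
      intro i hk
      have hi : i < s.length := by omega
      rw [List.range'_succ]
      simp only [List.foldl_cons]
      rw [foldl_min_out, foldl_min_out, ih (i + 1) (by omega)]
      -- right-hand side: unfold altGo once
      conv_rhs => rw [altGo]
      simp only [hi, dif_pos]
      have hj : (if i + 1 < s.length ∧ s[i + 1]! = 'A' then (altGo s s.length (i + 1)).2 else i + 1)
          = findJ s (i + 1) := by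
        rw [findJ]
        by_cases h : i + 1 < s.length ∧ s[i + 1]! = 'A'
        · simp only [h]
          exact altGo_snd s (s.length - (i + 1)) (i + 1) rfl h.1
        · rw [if_neg h, dif_neg h]
      simp only [hj]
      omega

-- ===== VERDICT (by name: the statement is the Claim_ definition above) =====
theorem solution_spec : Claim_equal_solution := by
  intro name _
  unfold Spec_solution
  simp only [solution, solution_alt]
  rw [answer_eq]
  have h := fold_eq_altGo name.toList name.toList.length 0 (by omega)
  rw [List.range_eq_range', h]
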